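-- pv_equiv track=rewrite | github.com/gino2013/LucianLeetcodeDaily | solutions/2025-09-03/test_fix.py | _advanced_sweep_line
-- ===== SOURCE A (Python) =====
-- from collections import defaultdict
--
-- def _advanced_sweep_line(points):
--     """高級掃描線算法 - 安全優化版本"""
--     n = len(points)
--     count = 0
--
--     # y座標分組優化
--     points_by_y = defaultdict(list)
--     for i, (x, y) in enumerate(points):
--         points_by_y[y].append((x, i))
--
--     # 對每個y的點按x排序
--     for y in points_by_y:
--         points_by_y[y].sort()
--
--     # y座標按降序
--     y_coords = sorted(points_by_y.keys(), reverse=True)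
--
--     # Alice遍歷
--     for alice_idx in range(n):
--         alice_x, alice_y = points[alice_idx]
--
--         # Bob遍歷
--         for bob_idx in range(n):
--             if alice_idx == bob_idx:
--                 continue
--
--             bob_x, bob_y = points[bob_idx]
--
--             if alice_x > bob_x or alice_y < bob_y:
--                 continue
--
--             # 安全的衝突檢測：使用索引優化但不預先剪枝
--             valid = True
--
--             for y in y_coords:
--                 if y > alice_y or y < bob_y:
--                     continue
--
--                 # 在這個y層級檢查x範圍內的點
--                 for x, point_idx in points_by_y[y]:
--                     if x > bob_x:
--                         break  # 早期終止
--
--                     if x >= alice_x and point_idx != alice_idx and point_idx != bob_idx: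
--                         valid = False
--                         break
--
--                 if not valid:
--                     break
--
--             if valid:
--                 count += 1
--
--     return count
-- ===== SOURCE B (Python) =====
-- def _advanced_sweep_line(points):
--     """Plain quadratic pair enumeration with a direct linear emptiness test
--     (no y-bucketing / sweep machinery)."""
--     n = len(points)
--
--     def rect_empty(a, b):
--         ax, ay = points[a]
--         bx, by = points[b]
--         return all(not (ax <= x <= bx and by <= y <= ay)
--                    for k, (x, y) in enumerate(points)
--                    if k != a and k != b)
--
--     return sum(1 for a in range(n) for b in range(n)
--                if a != b
--                and points[a][0] <= points[b][0]
--                and points[b][1] <= points[a][1]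
--                and rect_empty(a, b))
-- ===== Notes on version B (the rewrite author's own statement) =====
-- stated objective: simpler
-- what changed: A's per-pair emptiness test via a defaultdict of per-y x-sorted lists scanned level by level in descending y with early breaks is replaced by a plain pair enumeration with a direct single-pass scan over all points; the whole grouping/sorting preprocessing disappears.
import Mathlib
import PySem

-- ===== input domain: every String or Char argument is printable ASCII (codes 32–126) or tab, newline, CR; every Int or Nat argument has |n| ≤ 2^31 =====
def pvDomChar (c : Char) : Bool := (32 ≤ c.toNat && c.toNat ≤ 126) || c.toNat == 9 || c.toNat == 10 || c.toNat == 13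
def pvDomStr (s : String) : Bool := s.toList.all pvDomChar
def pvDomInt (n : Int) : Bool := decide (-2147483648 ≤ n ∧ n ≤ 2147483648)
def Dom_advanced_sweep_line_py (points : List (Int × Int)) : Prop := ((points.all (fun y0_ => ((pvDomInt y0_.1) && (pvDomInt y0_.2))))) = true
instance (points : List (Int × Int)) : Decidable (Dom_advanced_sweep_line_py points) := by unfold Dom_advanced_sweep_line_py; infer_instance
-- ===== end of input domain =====

-- B replaces A's y-bucketed sweep-line emptiness test (dict of per-y sorted lists,
-- descending-y scan with breaks) by a plain pair enumeration with a direct one-pass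
-- emptiness check: simpler, same worst-case cost.

-- ===== PORT A =====
-- inner loop 'for x, point_idx in points_by_y[y]: …' with its two breaks (returns valid)
def pvScanGroup (ax bx aIdx bIdx : Int) : List (Int × Int) → Bool
  | [] => true
  | (x, idx) :: rest =>
    if x > bx then true
    else if ax ≤ x ∧ idx ≠ aIdx ∧ idx ≠ bIdx then false
    else pvScanGroup ax bx aIdx bIdx rest

-- middle loop 'for y in y_coords: …' with its continue and 'if not valid: break'
def pvScanY (d : PySem.Dict Int (List (Int × Int))) (ax ay bx b_y aIdx bIdx : Int) :
    List Int → Bool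
  | [] => true
  | y :: rest =>
    if y > ay ∨ y < b_y then pvScanY d ax ay bx b_y aIdx bIdx rest
    else if pvScanGroup ax bx aIdx bIdx (d.getD y []) then
      pvScanY d ax ay bx b_y aIdx bIdx rest
    else false

-- points_by_y = defaultdict(list); for i,(x,y) in enumerate(points): points_by_y[y].append((x,i))
def pvBuildGroups (points : List (Int × Int)) : PySem.Dict Int (List (Int × Int)) :=
  (PySem.List.enumerate points 0).foldl
    (fun d p => d.modify p.2.2 [] (fun l => l ++ [(p.2.1, p.1)])) PySem.Dict.empty

-- for y in points_by_y: points_by_y[y].sort()   (int pairs sort lexicographically)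
def pvSortGroups (d0 : PySem.Dict Int (List (Int × Int))) : PySem.Dict Int (List (Int × Int)) :=
  d0.keys.foldl
    (fun d2 y => d2.insert y (PySem.List.sorted2 (d2.getD y []) (·.1) (·.2) false)) d0

def advanced_sweep_line_py (points : List (Int × Int)) : Int :=
  let n : Int := points.length
  let d := pvSortGroups (pvBuildGroups points)
  -- y_coords = sorted(points_by_y.keys(), reverse=True)
  let ys := PySem.List.sorted d.keys (fun y => y) true
  (PySem.List.pyRange 0 n 1).foldl (fun cnt aIdx =>
    let ap := PySem.List.pyGetD points aIdx (0, 0)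
    (PySem.List.pyRange 0 n 1).foldl (fun cnt bIdx =>
      if aIdx = bIdx then cnt
      else
        let bp := PySem.List.pyGetD points bIdx (0, 0)
        if ap.1 > bp.1 ∨ ap.2 < bp.2 then cnt
        else if pvScanY d ap.1 ap.2 bp.1 bp.2 aIdx bIdx ys then cnt + 1 else cnt)
      cnt) 0

-- ===== PORT B =====
-- all(not (ax <= x <= bx and by <= y <= ay) for k,(x,y) in enumerate(points) if k != a and k != b)
def pvRectEmpty (points : List (Int × Int)) (a b : Int) : Bool :=
  let ap := PySem.List.pyGetD points a (0, 0)
  let bp := PySem.List.pyGetD points b (0, 0)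
  (PySem.List.enumerate points 0).all (fun kp =>
    if kp.1 ≠ a ∧ kp.1 ≠ b then
      !(ap.1 ≤ kp.2.1 ∧ kp.2.1 ≤ bp.1 ∧ bp.2 ≤ kp.2.2 ∧ kp.2.2 ≤ ap.2)
    else true)

def advanced_sweep_line_py_alt (points : List (Int × Int)) : Int :=
  let n : Int := points.length
  (PySem.List.pyRange 0 n 1).foldl (fun s a =>
    (PySem.List.pyRange 0 n 1).foldl (fun s b =>
      if a ≠ b ∧ (PySem.List.pyGetD points a (0, 0)).1 ≤ (PySem.List.pyGetD points b (0, 0)).1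
          ∧ (PySem.List.pyGetD points b (0, 0)).2 ≤ (PySem.List.pyGetD points a (0, 0)).2
          ∧ pvRectEmpty points a b
      then s + 1 else s) s) 0

-- ===== PRECONDITION & SPEC =====
def Spec_advanced_sweep_line_py (points : List (Int × Int)) (out : Int) : Prop := out = advanced_sweep_line_py_alt points
instance (points : List (Int × Int)) (out : Int) : Decidable (Spec_advanced_sweep_line_py points out) := by unfold Spec_advanced_sweep_line_py; infer_instance

-- ===== CLAIM (what is proved, stated in full; the proofs are below) =====
def Claim_equal_advanced_sweep_line_py : Prop := ∀ (points : List (Int × Int)), Dom_advanced_sweep_line_py points → Spec_advanced_sweep_line_py points (advanced_sweep_line_py points)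

-- ===== LEMMAS AND PROOFS =====

-- grouping loop: the list accumulated at key y
theorem pvGroup_getD (l : List (Int × (Int × Int))) (d : PySem.Dict Int (List (Int × Int))) (y : Int) :
    (l.foldl (fun d p => d.modify p.2.2 [] (fun l => l ++ [(p.2.1, p.1)])) d).getD y []
      = d.getD y [] ++ ((l.filter (fun p => p.2.2 == y)).map (fun p => (p.2.1, p.1))) := by
  induction l generalizing d with
  | nil => simp
  | cons p rest ih =>
    simp only [List.foldl_cons, ih, List.filter_cons]
    by_cases h : p.2.2 = y
    · simp [h]
    · simp [h, PySem.Dict.getD_modify, Ne.symm h]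

-- sorting pass: each stored list is replaced by its sort, keys preserved
theorem pvSortPass_getD (ks : List Int) (d : PySem.Dict Int (List (Int × Int)))
    (hnd : ks.Nodup) (z : Int) :
    (ks.foldl (fun d2 y => d2.insert y (PySem.List.sorted2 (d2.getD y []) (·.1) (·.2) false)) d).getD z []
      = if z ∈ ks then PySem.List.sorted2 (d.getD z []) (·.1) (·.2) false else d.getD z [] := by
  induction ks generalizing d with
  | nil => simp
  | cons k rest ih =>
    simp only [List.foldl_cons]
    rcases List.nodup_cons.mp hnd with ⟨hk, hnd'⟩
    rw [ih _ hnd']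
    by_cases hz : z ∈ rest
    · have hne : z ≠ k := by rintro rfl; exact hk hz
      simp [hz, List.mem_cons, PySem.Dict.getD_insert, hne]
    · by_cases hzk : z = k
      · subst hzk; simp [hz, PySem.Dict.getD_insert]
      · simp [hz, hzk, PySem.Dict.getD_insert]

theorem pvSortPass_keys (ks : List Int) (d : PySem.Dict Int (List (Int × Int)))
    (hsub : ∀ k ∈ ks, k ∈ d.keys) :
    (ks.foldl (fun d2 y => d2.insert y (PySem.List.sorted2 (d2.getD y []) (·.1) (·.2) false)) d).keys
      = d.keys := by
  induction ks generalizing d with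
  | nil => simp
  | cons k rest ih =>
    simp only [List.foldl_cons]
    have hc : d.contains k = true := by
      rw [PySem.Dict.contains_iff_mem_keys]; exact hsub k (List.mem_cons_self)
    have hkeys := PySem.Dict.keys_insert_of_contains d (PySem.List.sorted2 (d.getD k []) (·.1) (·.2) false) hc
    rw [ih _ (by intro z hz; rw [hkeys]; exact hsub z (List.mem_cons_of_mem _ hz)), hkeys]

-- insertion into a list ordered by a strict (asymmetric, transitive) comparison keeps the order
theorem pvPairwise_insertBy {α : Type} (r : α → α → Bool)
    (hasym : ∀ a b, r a b = true → r b a = false)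
    (htrans : ∀ a b c, r a b = true → r b c = true → r a c = true)
    (x : α) (acc : List α) (h : acc.Pairwise (fun a b => r b a = false)) :
    (PySem.List.insertBy r x acc).Pairwise (fun a b => r b a = false) := by
  induction acc with
  | nil => simp [PySem.List.insertBy]
  | cons y ys ih =>
    rcases List.pairwise_cons.mp h with ⟨hy, hys⟩
    rw [PySem.List.insertBy]
    by_cases hxy : r x y = true
    · simp only [hxy, if_true]
      refine List.pairwise_cons.mpr ⟨?_, h⟩
      intro z hz
      rcases List.mem_cons.mp hz with rfl | hz'
      · exact hasym _ _ hxy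
      · by_cases hzx : r z x = true
        · have := htrans _ _ _ hzx hxy
          rw [hy z hz'] at this; exact absurd this (by simp)
        · simpa using hzx
    · simp only [hxy]
      refine List.pairwise_cons.mpr ⟨?_, ih hys⟩
      intro z hz
      rcases (PySem.List.mem_insertBy r x z ys).mp hz with rfl | hz'
      · simpa using hxy
      · exact hy z hz'

-- a lexicographically sorted group is nondecreasing in the first component
theorem pvSorted2_pairwise (xs : List (Int × Int)) :
    (PySem.List.sorted2 xs (·.1) (·.2) false).Pairwise (fun p q => p.1 ≤ q.1) := by
  have key :
      (xs.foldl (fun acc x => PySem.List.insertBy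
        (fun a b => decide (a.1 < b.1) || (!decide (b.1 < a.1) && decide (a.2 < b.2))) x acc) []).Pairwise
        (fun a b => (decide (b.1 < a.1) || (!decide (a.1 < b.1) && decide (b.2 < a.2))) = false) := by
    rw [List.foldl_eq_foldr_reverse]
    generalize xs.reverse = m
    induction m with
    | nil => simp
    | cons p t iht =>
      simp only [List.foldr_cons]
      apply pvPairwise_insertBy
      · intro a b hab
        rw [Bool.eq_false_iff]
        intro hba
        simp only [Bool.or_eq_true, Bool.and_eq_true, Bool.not_eq_true', decide_eq_true_eq, decide_eq_false_iff_not] at hab hba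
        omega
      · intro a b c h1 h2
        simp only [Bool.or_eq_true, Bool.and_eq_true, Bool.not_eq_true', decide_eq_true_eq, decide_eq_false_iff_not] at h1 h2 ⊢
        omega
      · exact iht
  have : PySem.List.sorted2 xs (·.1) (·.2) false
      = xs.foldl (fun acc x => PySem.List.insertBy
        (fun a b => decide (a.1 < b.1) || (!decide (b.1 < a.1) && decide (a.2 < b.2))) x acc) [] := by
    simp [PySem.List.sorted2]
  rw [this]
  refine key.imp ?_
  intro a b h
  rw [Bool.eq_false_iff] at h
  by_contra hlt
  exact h (by simp only [Bool.or_eq_true, decide_eq_true_eq]; omega)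

-- inner scan on an x-sorted group: true iff no blocking member
theorem pvScanGroup_iff (ax bx aIdx bIdx : Int) (g : List (Int × Int))
    (hs : g.Pairwise (fun p q => p.1 ≤ q.1)) :
    pvScanGroup ax bx aIdx bIdx g = true
      ↔ ∀ p ∈ g, ¬(ax ≤ p.1 ∧ p.1 ≤ bx ∧ p.2 ≠ aIdx ∧ p.2 ≠ bIdx) := by
  induction g with
  | nil => simp [pvScanGroup]
  | cons p rest ih =>
    rcases List.pairwise_cons.mp hs with ⟨hp, hrest⟩
    obtain ⟨x, idx⟩ := p
    rw [pvScanGroup]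
    by_cases hbx : x > bx
    · simp only [hbx, if_true, true_iff]
      intro q hq
      rcases List.mem_cons.mp hq with rfl | hq'
      · omega
      · have := hp q hq'; dsimp at this; omega
    · simp only [hbx, if_false]
      by_cases hbad : ax ≤ x ∧ idx ≠ aIdx ∧ idx ≠ bIdx
      · rw [if_pos hbad]
        simp only [Bool.false_eq_true, false_iff]
        intro hall
        exact hall (x, idx) List.mem_cons_self ⟨hbad.1, by omega, hbad.2.1, hbad.2.2⟩
      · rw [if_neg hbad, ih hrest]
        constructor
        · intro h q hq
          rcases List.mem_cons.mp hq with rfl | hq'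
          · dsimp; omega
          · exact h q hq'
        · intro h q hq; exact h q (List.mem_cons_of_mem _ hq)

-- middle loop: true iff every in-range level passes
theorem pvScanY_iff (d : PySem.Dict Int (List (Int × Int))) (ax ay bx b_y aIdx bIdx : Int)
    (ys : List Int) :
    pvScanY d ax ay bx b_y aIdx bIdx ys = true
      ↔ ∀ y ∈ ys, ¬(y > ay ∨ y < b_y) → pvScanGroup ax bx aIdx bIdx (d.getD y []) = true := by
  induction ys with
  | nil => simp [pvScanY]
  | cons y rest ih =>
    rw [pvScanY]
    by_cases hskip : y > ay ∨ y < b_y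
    · simp only [hskip, if_true, ih]
      constructor
      · intro h z hz hzr
        rcases List.mem_cons.mp hz with rfl | hz'
        · exact absurd hskip hzr
        · exact h z hz' hzr
      · intro h z hz; exact h z (List.mem_cons_of_mem _ hz)
    · simp only [hskip, if_false]
      by_cases hg : pvScanGroup ax bx aIdx bIdx (d.getD y []) = true
      · simp only [hg, if_true, ih]
        constructor
        · intro h z hz hzr
          rcases List.mem_cons.mp hz with rfl | hz'
          · exact hg
          · exact h z hz' hzr
        · intro h z hz; exact h z (List.mem_cons_of_mem _ hz)
      · simp only [hg, if_false, Bool.false_eq_true, false_iff]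
        intro hall
        exact hg (hall y List.mem_cons_self hskip)

-- keys of the group dict = the set of y coordinates
theorem pvKeys_mem (points : List (Int × Int)) (y : Int) :
    y ∈ (pvBuildGroups points).keys ↔ ∃ k : Nat, ∃ _ : k < points.length, (points[k]).2 = y := by
  unfold pvBuildGroups
  have h1 := PySem.Dict.keys_foldl_modify_key (PySem.List.enumerate points 0) (fun p => p.2.2)
    ([] : List (Int × Int)) (fun _ p l => l ++ [(p.2.1, p.1)]) PySem.Dict.empty
  rw [h1, PySem.Set.mem_update]
  simp only [PySem.Dict.keys_empty, List.not_mem_nil, false_or, List.mem_map]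
  constructor
  · rintro ⟨p, hp, rfl⟩
    rcases (PySem.List.mem_enumerate_iff points 0 p).mp hp with ⟨k, hk, rfl⟩
    exact ⟨k, hk, rfl⟩
  · rintro ⟨k, hk, rfl⟩
    exact ⟨(0 + (k : Int), points[k]), (PySem.List.mem_enumerate_iff points 0 _).mpr ⟨k, hk, rfl⟩, rfl⟩

theorem pvKeys_nodup (points : List (Int × Int)) : (pvBuildGroups points).keys.Nodup := by
  unfold pvBuildGroups
  exact PySem.Dict.nodup_keys_foldl_modify_key (PySem.List.enumerate points 0) (fun p => p.2.2)
    ([] : List (Int × Int)) (fun _ p l => l ++ [(p.2.1, p.1)]) PySem.Dict.empty (by simp)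

-- membership in a (sorted) group of the final dict
theorem pvGroup_mem (points : List (Int × Int)) (y x i : Int) :
    (x, i) ∈ (pvSortGroups (pvBuildGroups points)).getD y []
      ↔ ∃ k : Nat, ∃ _ : k < points.length, (i = (k : Int) ∧ points[k] = (x, y)) := by
  have hbase : (pvBuildGroups points).getD y []
      = ((PySem.List.enumerate points 0).filter (fun p => p.2.2 == y)).map (fun p => (p.2.1, p.1)) := by
    unfold pvBuildGroups
    rw [pvGroup_getD]
    simp
  have hmem : ∀ q, q ∈ (pvSortGroups (pvBuildGroups points)).getD y []
      ↔ q ∈ (pvBuildGroups points).getD y [] := by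
    intro q
    unfold pvSortGroups
    rw [pvSortPass_getD _ _ (pvKeys_nodup points)]
    by_cases hy : y ∈ (pvBuildGroups points).keys
    · rw [if_pos hy]
      exact List.Perm.mem_iff (PySem.List.sorted2_perm _ _ _ _)
    · rw [if_neg hy]
  rw [hmem, hbase]
  simp only [List.mem_map, List.mem_filter, beq_iff_eq]
  constructor
  · rintro ⟨p, ⟨hp, hpy⟩, hq⟩
    rcases (PySem.List.mem_enumerate_iff points 0 p).mp hp with ⟨k, hk, rfl⟩
    simp only at hpy hq
    rw [Prod.mk.injEq] at hq
    exact ⟨k, hk, by omega, Prod.ext_iff.mpr ⟨hq.1, hpy⟩⟩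
  · rintro ⟨k, hk, rfl, hpt⟩
    refine ⟨(0 + (k : Int), points[k]), ⟨(PySem.List.mem_enumerate_iff points 0 _).mpr ⟨k, hk, rfl⟩, by rw [hpt]⟩, by simp [hpt]⟩

-- every group of the final dict is nondecreasing in x
theorem pvGroup_pairwise (points : List (Int × Int)) (y : Int) :
    ((pvSortGroups (pvBuildGroups points)).getD y []).Pairwise (fun p q => p.1 ≤ q.1) := by
  unfold pvSortGroups
  rw [pvSortPass_getD _ _ (pvKeys_nodup points)]
  by_cases hy : y ∈ (pvBuildGroups points).keys
  · rw [if_pos hy]; exact pvSorted2_pairwise _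
  · rw [if_neg hy]
    have : (pvBuildGroups points).getD y [] = [] := by
      apply PySem.Dict.getD_of_not_contains
      rw [← Bool.not_eq_true, PySem.Dict.contains_iff_mem_keys]
      exact hy
    rw [this]
    exact List.Pairwise.nil

-- the sorted key list of the final dict enumerates the y coordinates
theorem pvYs_mem (points : List (Int × Int)) (y : Int) :
    y ∈ PySem.List.sorted (pvSortGroups (pvBuildGroups points)).keys (fun y => y) true
      ↔ ∃ k : Nat, ∃ _ : k < points.length, (points[k]).2 = y := by
  rw [PySem.List.mem_sorted]
  unfold pvSortGroups
  rw [pvSortPass_keys _ _ (fun k hk => hk)]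
  exact pvKeys_mem points y

-- core per-pair equivalence: A's layered scan = B's direct scan
theorem pvPair_eq (points : List (Int × Int)) (a b : Int) :
    pvScanY (pvSortGroups (pvBuildGroups points))
        (PySem.List.pyGetD points a (0, 0)).1 (PySem.List.pyGetD points a (0, 0)).2
        (PySem.List.pyGetD points b (0, 0)).1 (PySem.List.pyGetD points b (0, 0)).2 a b
        (PySem.List.sorted (pvSortGroups (pvBuildGroups points)).keys (fun y => y) true)
      = pvRectEmpty points a b := by
  rw [Bool.eq_iff_iff]
  rw [pvScanY_iff]
  unfold pvRectEmpty
  simp only [List.all_eq_true]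
  constructor
  · -- layered scan valid → direct check valid
    intro h kp hkp
    rcases (PySem.List.mem_enumerate_iff points 0 kp).mp hkp with ⟨k, hk, rfl⟩
    simp only
    by_cases hne : (0 + (k : Int) ≠ a ∧ 0 + (k : Int) ≠ b)
    · rw [if_pos hne]
      simp only [Bool.not_eq_eq_eq_not, Bool.not_true, decide_eq_false_iff_not]
      intro ⟨h1, h2, h3, h4⟩
      have hy : (points[k]).2 ∈ PySem.List.sorted (pvSortGroups (pvBuildGroups points)).keys (fun y => y) true :=
        (pvYs_mem points _).mpr ⟨k, hk, rfl⟩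
      have hin : ¬((points[k]).2 > (PySem.List.pyGetD points a (0, 0)).2
          ∨ (points[k]).2 < (PySem.List.pyGetD points b (0, 0)).2) := by omega
      have hgrp := (pvScanGroup_iff _ _ _ _ _ (pvGroup_pairwise points (points[k]).2)).mp (h _ hy hin)
      have hmem : ((points[k]).1, (k : Int)) ∈ (pvSortGroups (pvBuildGroups points)).getD (points[k]).2 [] :=
        (pvGroup_mem points _ _ _).mpr ⟨k, hk, rfl, rfl⟩
      exact hgrp _ hmem ⟨h1, h2, by omega, by omega⟩
    · rw [if_neg hne]
  · -- direct check valid → layered scan valid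
    intro h y hy hin
    rw [pvScanGroup_iff _ _ _ _ _ (pvGroup_pairwise points y)]
    rintro ⟨x, i⟩ hmem ⟨h1, h2, h3, h4⟩
    rcases (pvGroup_mem points y x i).mp hmem with ⟨k, hk, rfl, hpt⟩
    have := h (0 + (k : Int), points[k]) ((PySem.List.mem_enumerate_iff points 0 _).mpr ⟨k, hk, rfl⟩)
    simp only at this
    rw [if_pos ⟨by omega, by omega⟩] at this
    simp only [Bool.not_eq_eq_eq_not, Bool.not_true, decide_eq_false_iff_not] at this
    rw [hpt] at this
    simp only at this
    exact this ⟨h1, h2, by omega, by omega⟩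

-- ===== VERDICT (by name: the statement is the Claim_ definition above) =====
theorem advanced_sweep_line_py_spec : Claim_equal_advanced_sweep_line_py := by
  intro points _
  unfold Spec_advanced_sweep_line_py advanced_sweep_line_py advanced_sweep_line_py_alt
  simp only
  apply PySem.List.foldl_congr_mem
  intro acc a _
  apply PySem.List.foldl_congr_mem
  intro acc2 b _
  by_cases hab : a = b
  · rw [if_pos hab, if_neg (by tauto)]
  · rw [if_neg hab]
    by_cases hgeo : (PySem.List.pyGetD points a (0, 0)).1 > (PySem.List.pyGetD points b (0, 0)).1
        ∨ (PySem.List.pyGetD points a (0, 0)).2 < (PySem.List.pyGetD points b (0, 0)).2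
    · rw [if_pos hgeo, if_neg (by rintro ⟨_, h1, h2, _⟩; omega)]
    · rw [if_neg hgeo]
      rw [pvPair_eq points a b]
      by_cases hre : pvRectEmpty points a b = true
      · rw [if_pos hre, if_pos ⟨hab, by omega, by omega, hre⟩]
      · rw [if_neg hre, if_neg (by tauto)]
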